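-- pv_equiv track=rewrite | github.com/aswinguvvala/Code_Analyzer | architecture_analyzer.py | _resolve_javascript_import
-- ===== SOURCE A (Python) =====
-- from typing import Dict, List, Any, Set, Tuple, Optional
--
-- def _resolve_javascript_import(import_path: str) -> Optional[str]:
--     """
--     Resolve JavaScript import paths to module names.
--
--     Examples:
--     - './utils' -> utils
--     - '../components/Button' -> components.Button
--     - './helpers/index' -> helpers
--     """
--     if not import_path.startswith('.'):
--         # External module, not a local dependency
--         return None
--
--     # Remove leading './' and '../'
--     cleaned_path = import_path
--     while cleaned_path.startswith('./') or cleaned_path.startswith('../'):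
--         if cleaned_path.startswith('./'):
--             cleaned_path = cleaned_path[2:]
--         else:
--             cleaned_path = cleaned_path[3:]
--
--     # Convert to module name format
--     module_name = cleaned_path.replace('/', '.')
--
--     # Remove common suffixes
--     if module_name.endswith('.index'):
--         module_name = module_name[:-6]
--
--     return module_name if module_name else None
-- ===== SOURCE B (Python) =====
-- from typing import Optional
--
-- def _resolve_javascript_import(import_path: str) -> Optional[str]:
--     if not import_path.startswith('.'):
--         return None
--     # single left-to-right pass: fuse prefix-stripping, '/'->'.' translation
--     # and joining into one character scan with a (out, seg, skipping) state
--     out = []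
--     seg = []
--     skipping = True
--     for ch in import_path:
--         if ch == '/':
--             if skipping and (seg == ['.'] or seg == ['.', '.']):
--                 seg = []
--             else:
--                 skipping = False
--                 out.extend(seg)
--                 out.append('.')
--                 seg = []
--         else:
--             seg.append(ch)
--     out.extend(seg)
--     if out[-6:] == list('.index'):
--         del out[-6:]
--     return ''.join(out) if out else None
-- ===== Notes on version B (the rewrite author's own statement) =====
-- stated objective: alternative
-- what changed: Replaces A's three staged string passes (while-loop stripping './'/'../' prefixes, then str.replace('/','.'), then suffix trim) with a single left-to-right character scan driven by an (out, seg, skipping) accumulator state machine that strips, translates and joins in one pass.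
import Mathlib
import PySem

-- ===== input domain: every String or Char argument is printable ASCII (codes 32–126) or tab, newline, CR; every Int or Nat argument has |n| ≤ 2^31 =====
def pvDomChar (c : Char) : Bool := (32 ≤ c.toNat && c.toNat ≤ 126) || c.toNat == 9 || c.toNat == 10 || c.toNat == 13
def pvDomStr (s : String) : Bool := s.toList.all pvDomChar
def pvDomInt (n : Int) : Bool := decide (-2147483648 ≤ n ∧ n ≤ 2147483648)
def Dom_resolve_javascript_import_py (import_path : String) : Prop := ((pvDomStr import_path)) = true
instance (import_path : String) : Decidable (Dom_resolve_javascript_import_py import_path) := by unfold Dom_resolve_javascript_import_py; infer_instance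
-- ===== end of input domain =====

-- B fuses A's three staged passes (prefix-strip while-loop, str.replace('/','.'),
-- suffix trim) into one left-to-right character scan with an (out, seg, skipping)
-- accumulator; alternative decomposition, same cost. A = B proved on all inputs.

-- ===== PORT A =====
-- the while-loop: while cleaned.startswith('./') or cleaned.startswith('../'):
-- drop 2 resp. 3 chars.  startswith('./') on a char list is exactly the pattern
-- '.' :: '/' :: _, and s[2:] / s[3:] are the matched tails (exact).
def pvStripA : List Char → List Char
  | '.' :: '/' :: t => pvStripA t
  | '.' :: '.' :: '/' :: t => pvStripA t
  | s => s

def resolve_javascript_import_py (import_path : String) : Option String :=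
  if ¬ PySem.Str.startswith import_path "." then none
  else
    let cleaned_path := pvStripA import_path.toList
    let module_name := PySem.Chars.replace cleaned_path ['/'] ['.']
    let module_name :=
      if PySem.Chars.endswith module_name ['.', 'i', 'n', 'd', 'e', 'x'] then
        PySem.Chars.slice module_name none (some (-6))
      else module_name
    if module_name = [] then none else some (String.ofList module_name)

-- ===== PORT B =====
-- the for-loop body of Source B: one step of the (out, seg, skipping) state machine (exact)
def pvStepB (st : List Char × List Char × Bool) (ch : Char) : List Char × List Char × Bool :=
  match st with
  | (out, seg, skipping) =>
    if ch = '/' then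
      if skipping ∧ (seg = ['.'] ∨ seg = ['.', '.']) then (out, [], skipping)
      else (out ++ seg ++ ['.'], [], false)
    else (out, seg ++ [ch], skipping)

def resolve_javascript_import_py_alt (import_path : String) : Option String :=
  if ¬ PySem.Str.startswith import_path "." then none
  else
    let st := import_path.toList.foldl pvStepB ([], [], true)
    let out := st.1 ++ st.2.1
    -- out[-6:] == list('.index')  /  del out[-6:] (keeps out[:-6])
    let out :=
      if PySem.Chars.slice out (some (-6)) none = ['.', 'i', 'n', 'd', 'e', 'x'] then
        PySem.Chars.slice out none (some (-6))
      else out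
    if out = [] then none else some (String.ofList out)

-- ===== PRECONDITION & SPEC =====
def Spec_resolve_javascript_import_py (import_path : String) (out : Option String) : Prop := out = resolve_javascript_import_py_alt import_path
instance (import_path : String) (out : Option String) : Decidable (Spec_resolve_javascript_import_py import_path out) := by unfold Spec_resolve_javascript_import_py; infer_instance

-- ===== CLAIM =====
def Claim_equal_resolve_javascript_import_py : Prop := ∀ (import_path : String), Dom_resolve_javascript_import_py import_path → Spec_resolve_javascript_import_py import_path (resolve_javascript_import_py import_path)

-- ===== LEMMAS AND PROOFS =====

def pvDotChar (c : Char) : Char := if c = '/' then '.' else c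

theorem pvReplace_go (cs acc : List Char) (fuel : Nat) (hf : cs.length ≤ fuel) :
    PySem.Chars.replace.go ['/'] ['.'] fuel cs acc
      = acc.reverse ++ cs.map pvDotChar := by
  induction fuel generalizing cs acc with
  | zero =>
    have : cs = [] := List.length_eq_zero_iff.mp (Nat.le_zero.mp hf)
    subst this
    simp [PySem.Chars.replace.go]
  | succ n ih =>
    cases cs with
    | nil => simp [PySem.Chars.replace.go]
    | cons c t =>
      by_cases hc : c = '/'
      · subst hc
        have hpre : List.isPrefixOf ['/'] ('/' :: t) = true := by
          simp [List.isPrefixOf]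
        simp only [PySem.Chars.replace.go, hpre, if_true]
        rw [ih _ _ (by simpa using Nat.le_of_succ_le_succ hf)]
        simp [pvDotChar]
      · have hpre : List.isPrefixOf ['/'] (c :: t) = false := by
          simp only [List.isPrefixOf, Bool.and_true, Bool.eq_false_iff]
          exact fun hq => hc (beq_iff_eq.mp hq).symm
        simp only [PySem.Chars.replace.go, hpre, Bool.false_eq_true, if_false]
        rw [ih _ _ (by simpa using Nat.le_of_succ_le_succ hf)]
        simp [pvDotChar, hc]

theorem replace_eq_map (cs : List Char) :
    PySem.Chars.replace cs ['/'] ['.'] = cs.map pvDotChar := by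
  unfold PySem.Chars.replace
  simp only [List.isEmpty_cons, Bool.false_eq_true, if_false]
  exact pvReplace_go cs [] cs.length le_rfl

-- once skipping is off, the scan just copies with '/'→'.'
theorem foldB_false (cs : List Char) : ∀ (out seg : List Char),
    (cs.foldl pvStepB (out, seg, false)).1 ++ (cs.foldl pvStepB (out, seg, false)).2.1
      = out ++ seg ++ cs.map pvDotChar := by
  induction cs with
  | nil => intro out seg; simp
  | cons c t ih =>
    intro out seg
    by_cases hc : c = '/'
    · subst hc
      have hstep : pvStepB (out, seg, false) '/' = (out ++ seg ++ ['.'], [], false) := by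
        simp [pvStepB]
      rw [List.foldl_cons, hstep, ih]
      simp [pvDotChar]
    · have hstep : pvStepB (out, seg, false) c = (out, seg ++ [c], false) := by
        simp [pvStepB, hc]
      rw [List.foldl_cons, hstep, ih]
      simp [pvDotChar, hc]

-- while skipping, a current segment that cannot grow into '.' or '..' behaves as copied
theorem foldB_skip_noDot (cs : List Char) : ∀ (out seg : List Char),
    ¬ seg <+: ['.', '.'] →
    (cs.foldl pvStepB (out, seg, true)).1 ++ (cs.foldl pvStepB (out, seg, true)).2.1
      = out ++ seg ++ cs.map pvDotChar := by
  induction cs with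
  | nil => intro out seg _; simp
  | cons c t ih =>
    intro out seg hQ
    by_cases hc : c = '/'
    · subst hc
      have hns : ¬ (seg = ['.'] ∨ seg = ['.', '.']) := by
        rintro (h | h) <;> subst h <;> exact hQ (by decide)
      have hstep : pvStepB (out, seg, true) '/' = (out ++ seg ++ ['.'], [], false) := by
        simp [pvStepB, hns]
      rw [List.foldl_cons, hstep, foldB_false]
      simp [pvDotChar]
    · have hstep : pvStepB (out, seg, true) c = (out, seg ++ [c], true) := by
        simp [pvStepB, hc]
      rw [List.foldl_cons, hstep,
        ih _ _ (fun h => hQ ((List.prefix_append seg [c]).trans h))]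
      simp [pvDotChar, hc]

theorem foldB_main (cs : List Char) :
    (cs.foldl pvStepB ([], [], true)).1 ++ (cs.foldl pvStepB ([], [], true)).2.1
      = (pvStripA cs).map pvDotChar := by
  fun_induction pvStripA cs with
  | case1 t ih => exact ih
  | case2 t ih => exact ih
  | case3 s h1 h2 =>
    cases s with
    | nil => rfl
    | cons c t =>
      by_cases hc : c = '/'
      · subst hc
        have hstep : List.foldl pvStepB ([], [], true) ('/' :: t)
            = List.foldl pvStepB (['.'], [], false) t := rfl
        rw [hstep, foldB_false]
        simp [pvDotChar]
      · by_cases hcd : c = '.'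
        · subst hcd
          cases t with
          | nil => rfl
          | cons c2 t2 =>
            by_cases hc2 : c2 = '/'
            · exact absurd (by rw [hc2]) (h1 t2)
            · by_cases hc2d : c2 = '.'
              · subst hc2d
                cases t2 with
                | nil => rfl
                | cons c3 t3 =>
                  by_cases hc3 : c3 = '/'
                  · exact absurd (by rw [hc3]) (h2 t3)
                  · have hstep : List.foldl pvStepB ([], [], true) ('.' :: '.' :: c3 :: t3)
                        = List.foldl pvStepB ([], ['.', '.'] ++ [c3], true) t3 := by
                      rw [List.foldl_cons, List.foldl_cons, List.foldl_cons,
                        show pvStepB (pvStepB ([], [], true) '.') '.'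
                          = (([], ['.', '.'], true) : List Char × List Char × Bool) from rfl]
                      congr 1
                      simp [pvStepB, hc3]
                    rw [hstep, foldB_skip_noDot t3 [] (['.', '.'] ++ [c3])
                      (fun h => by have := h.length_le; simp at this)]
                    simp [pvDotChar, hc3]
              · have hstep : List.foldl pvStepB ([], [], true) ('.' :: c2 :: t2)
                    = List.foldl pvStepB ([], ['.'] ++ [c2], true) t2 := by
                  rw [List.foldl_cons, List.foldl_cons,
                    show pvStepB ([], [], true) '.'
                      = (([], ['.'], true) : List Char × List Char × Bool) from rfl]
                  congr 1
                  simp [pvStepB, hc2]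
                rw [hstep, foldB_skip_noDot t2 [] (['.'] ++ [c2])
                  (fun h => hc2d (by have := h.eq_of_length (by simp); simpa using this))]
                simp [pvDotChar, hc2]
        · have hstep : List.foldl pvStepB ([], [], true) (c :: t)
              = List.foldl pvStepB ([], [] ++ [c], true) t := by
            rw [List.foldl_cons]
            congr 1
            simp [pvStepB, hc]
          rw [hstep, foldB_skip_noDot t [] ([] ++ [c])
            (fun h => by obtain ⟨u, hu⟩ := h; simp at hu; exact hcd hu.1)]
          simp [pvDotChar, hc]

theorem suffix_iff_drop (m : List Char) :
    ['.', 'i', 'n', 'd', 'e', 'x'] <:+ m ↔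
      m.drop (m.length - 6) = ['.', 'i', 'n', 'd', 'e', 'x'] := by
  constructor
  · rintro ⟨t, rfl⟩
    have hl : (t ++ ['.', 'i', 'n', 'd', 'e', 'x']).length - 6 = t.length := by simp
    rw [hl]
    exact List.drop_left
  · intro h
    rw [← h]
    exact List.drop_suffix _ _

theorem trim_eq (m : List Char) :
    (if PySem.Chars.endswith m ['.', 'i', 'n', 'd', 'e', 'x'] then
        PySem.Chars.slice m none (some (-6)) else m)
      = (if PySem.Chars.slice m (some (-6)) none = ['.', 'i', 'n', 'd', 'e', 'x'] then
        PySem.Chars.slice m none (some (-6)) else m) := by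
  have hslice : PySem.Chars.slice m (some (-6)) none = m.drop (m.length - 6) := by
    simp only [PySem.Chars.slice_eq_listSlice]
    exact PySem.List.slice_from_neg_ofNat m 6 (by omega)
  have hcond : (PySem.Chars.endswith m ['.', 'i', 'n', 'd', 'e', 'x'] = true)
      ↔ PySem.Chars.slice m (some (-6)) none = ['.', 'i', 'n', 'd', 'e', 'x'] := by
    rw [PySem.Chars.endswith_iff, hslice]
    exact suffix_iff_drop m
  exact if_congr hcond rfl rfl

-- ===== VERDICT =====
theorem resolve_javascript_import_py_spec : Claim_equal_resolve_javascript_import_py := by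
  intro import_path _
  unfold Spec_resolve_javascript_import_py
  unfold resolve_javascript_import_py resolve_javascript_import_py_alt
  by_cases h : PySem.Str.startswith import_path "."
  · rw [if_neg (not_not_intro h), if_neg (not_not_intro h)]
    simp only [replace_eq_map, ← foldB_main import_path.toList, trim_eq]
  · rw [if_pos h, if_pos h]
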